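-- pv_equiv track=rewrite | github.com/Enjef/Algo | 1400 - 1499/1410 - HTML Entity Parser/1410 - HTML Entity Parser.py | entityParser_v3
-- ===== SOURCE A (Python) =====
-- def entityParser_v3(text: str) -> str:  # 5.13% 32.48%
--     pattern = {
--         '&quot;' : '"',
--         '&apos;' : "'",
--         '&amp;' : '&',
--         '&gt;' : '>',
--         '&lt;' : '<',
--         '&frasl;' : '/'
--     }
--     out = []
--     i = 0
--     n = len(text)
--     while i < n:
--         if text[i] == '&':
--             for key in pattern:
--                 if text[i:].startswith(key):
--                     out.append(pattern[key])
--                     i += len(key) - 1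
--                     break
--             else:
--                 out.append(text[i])
--         else:
--             out.append(text[i])
--         i += 1
--     return ''.join(out)
-- ===== SOURCE B (Python) =====
-- def entityParser_v3(text: str) -> str:
--     # Different algorithm: split the text on '&' once; every '&' starts a
--     # candidate entity, so each later piece either begins with one of the six
--     # entity tails ("quot;", ...) and gets its replacement character prepended,
--     # or gets the literal '&' restored. No per-character scanning loop.
--     subs = [("quot;", '"'), ("apos;", "'"), ("amp;", "&"),
--             ("gt;", ">"), ("lt;", "<"), ("frasl;", "/")]
--     parts = text.split('&')
--     res = [parts[0]]
--     for p in parts[1:]: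
--         for suf, ch in subs:
--             if p.startswith(suf):
--                 res.append(ch + p[len(suf):])
--                 break
--         else:
--             res.append('&' + p)
--     return ''.join(res)
-- ===== Notes on version B (the rewrite author's own statement) =====
-- stated objective: faster
-- what changed: B splits the text once on ampersands and maps each resulting piece (prepending the replacement when it begins with a recognized entity tail, else restoring the ampersand), replacing A's per-character while-loop that tests all six keys against a fresh suffix slice at every ampersand.
import Mathlib
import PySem

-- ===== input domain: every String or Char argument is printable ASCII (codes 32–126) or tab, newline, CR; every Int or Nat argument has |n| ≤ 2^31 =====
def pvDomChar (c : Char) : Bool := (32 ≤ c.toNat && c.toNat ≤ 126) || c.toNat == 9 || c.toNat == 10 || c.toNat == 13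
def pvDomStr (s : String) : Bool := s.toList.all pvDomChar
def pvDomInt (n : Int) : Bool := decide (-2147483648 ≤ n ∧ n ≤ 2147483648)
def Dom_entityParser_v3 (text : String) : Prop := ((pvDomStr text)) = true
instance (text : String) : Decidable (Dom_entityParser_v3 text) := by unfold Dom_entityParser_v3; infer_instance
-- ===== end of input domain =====

-- B splits the text once on ampersands and maps each piece (entity tail → replacement, else restore the ampersand),
-- replacing A's per-character scan that tests all six keys at every ampersand (objective: alternative).

-- ===== PORT A =====
-- A's 'pattern' dict as an association list in insertion order; values are the replacement characters.
def pvPatternA : List (List Char × Char) :=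
  [ (['&','q','u','o','t',';'], '"'),
    (['&','a','p','o','s',';'], '\''),
    (['&','a','m','p',';'], '&'),
    (['&','g','t',';'], '>'),
    (['&','l','t',';'], '<'),
    (['&','f','r','a','s','l',';'], '/') ]

-- A's 'for key in pattern: if text[i:].startswith(key): … break / else: …' — returns the
-- replacement and len(key) of the first matching key, none when the for-loop falls through.
def pvTryA : List (List Char × Char) → List Char → Option (Char × Nat)
  | [], _ => none
  | (k, v) :: ps, s => if PySem.Chars.startswith s k then some (v, k.length) else pvTryA ps s

-- A's while-loop over i, written as the recursion on the suffix text[i:] (i += … is List.drop).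
def entityParser_v3aux : List Char → List Char
  | [] => []
  | c :: s =>
    if c = '&' then
      match pvTryA pvPatternA (c :: s) with
      | some (v, klen) => v :: entityParser_v3aux (s.drop (klen - 1))  -- i += len(key)-1; i += 1
      | none => c :: entityParser_v3aux s
    else c :: entityParser_v3aux s
termination_by s => s.length
decreasing_by all_goals (simp; try omega)

def entityParser_v3 (text : String) : String := String.ofList (entityParser_v3aux text.toList)

-- ===== PORT B =====
-- B's 'subs' table: entity tails (the key without its leading '&') and their replacements.
def pvSubsB : List (List Char × Char) :=
  [ (['q','u','o','t',';'], '"'),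
    (['a','p','o','s',';'], '\''),
    (['a','m','p',';'], '&'),
    (['g','t',';'], '>'),
    (['l','t',';'], '<'),
    (['f','r','a','s','l',';'], '/') ]

-- text.split('&'): first component = piece before the first '&', second = the later pieces.
def pvSplitAmp : List Char → List Char × List (List Char)
  | [] => ([], [])
  | c :: s =>
    let r := pvSplitAmp s
    if c = '&' then ([], r.1 :: r.2) else (c :: r.1, r.2)

-- B's inner for/else over 'subs': replacement ++ p[len(suf):] on the first matching tail, else '&' + p.
def pvSub : List (List Char × Char) → List Char → List Char
  | [], p => '&' :: p
  | (suf, ch) :: rest, p =>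
    if PySem.Chars.startswith p suf then ch :: p.drop suf.length else pvSub rest p

def entityParser_v3_alt (text : String) : String :=
  let r := pvSplitAmp text.toList
  String.ofList (r.1 ++ r.2.flatMap (pvSub pvSubsB))

-- ===== PRECONDITION & SPEC =====
def Spec_entityParser_v3 (text : String) (out : String) : Prop := out = entityParser_v3_alt text
instance (text : String) (out : String) : Decidable (Spec_entityParser_v3 text out) := by unfold Spec_entityParser_v3; infer_instance

-- ===== CLAIM (what is proved, stated in full; the proofs are below) =====
def Claim_equal_entityParser_v3 : Prop := ∀ (text : String), Dom_entityParser_v3 text → Spec_entityParser_v3 text (entityParser_v3 text)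

-- ===== LEMMAS AND PROOFS =====

-- B's whole pipeline on a character list (proof-only abbreviation).
def pvBaux (s : List Char) : List Char :=
  (pvSplitAmp s).1 ++ (pvSplitAmp s).2.flatMap (pvSub pvSubsB)

-- the first split piece is a prefix of the input
lemma pvSplit_fst_prefix (s : List Char) : (pvSplitAmp s).1 <+: s := by
  induction s with
  | nil => simp [pvSplitAmp]
  | cons c s ih =>
    by_cases hc : c = '&'
    · simp [pvSplitAmp, hc]
    · simpa [pvSplitAmp, hc, List.cons_prefix_cons] using ih

-- when A's for-loop falls through at an '&', none of B's tails is a prefix of the split piece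
lemma pvSub_none (s : List Char) (h : pvTryA pvPatternA ('&' :: s) = none) :
    pvSub pvSubsB (pvSplitAmp s).1 = '&' :: (pvSplitAmp s).1 := by
  have hpre : (pvSplitAmp s).1 <+: s := pvSplit_fst_prefix s
  simp only [pvTryA, pvPatternA] at h
  split_ifs at h with h1 h2 h3 h4 h5 h6
  simp only [pvSub, pvSubsB]
  split_ifs with g1 g2 g3 g4 g5 g6
  · exact absurd ((PySem.Chars.startswith_iff _ _).mpr
      (List.cons_prefix_cons.mpr ⟨rfl, ((PySem.Chars.startswith_iff _ _).mp g1).trans hpre⟩)) h1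
  · exact absurd ((PySem.Chars.startswith_iff _ _).mpr
      (List.cons_prefix_cons.mpr ⟨rfl, ((PySem.Chars.startswith_iff _ _).mp g2).trans hpre⟩)) h2
  · exact absurd ((PySem.Chars.startswith_iff _ _).mpr
      (List.cons_prefix_cons.mpr ⟨rfl, ((PySem.Chars.startswith_iff _ _).mp g3).trans hpre⟩)) h3
  · exact absurd ((PySem.Chars.startswith_iff _ _).mpr
      (List.cons_prefix_cons.mpr ⟨rfl, ((PySem.Chars.startswith_iff _ _).mp g4).trans hpre⟩)) h4
  · exact absurd ((PySem.Chars.startswith_iff _ _).mpr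
      (List.cons_prefix_cons.mpr ⟨rfl, ((PySem.Chars.startswith_iff _ _).mp g5).trans hpre⟩)) h5
  · exact absurd ((PySem.Chars.startswith_iff _ _).mpr
      (List.cons_prefix_cons.mpr ⟨rfl, ((PySem.Chars.startswith_iff _ _).mp g6).trans hpre⟩)) h6
  · rfl

lemma pvAux_eq (n : Nat) : ∀ s : List Char, s.length ≤ n →
    entityParser_v3aux s = pvBaux s := by
  induction n with
  | zero =>
    intro s hs
    have : s = [] := List.length_eq_zero_iff.mp (Nat.le_zero.mp hs)
    subst this; simp [entityParser_v3aux, pvBaux, pvSplitAmp]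
  | succ n ih =>
    intro s hs
    match s with
    | [] => simp [entityParser_v3aux, pvBaux, pvSplitAmp]
    | c :: s' =>
      have hlen : s'.length ≤ n := by simpa using hs
      by_cases hc : c = '&'
      · subst hc
        cases htry : pvTryA pvPatternA ('&' :: s') with
        | some p =>
          obtain ⟨v, k⟩ := p
          -- A matched some key: peel the six cases, each exposes s' = tail ++ rest explicitly
          simp only [pvTryA, pvPatternA] at htry
          split_ifs at htry with h1 h2 h3 h4 h5 h6 <;>
            simp only [Option.some.injEq, Prod.mk.injEq] at htry
          all_goals obtain ⟨rfl, rfl⟩ := htry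
          · obtain ⟨rest, hr⟩ := (PySem.Chars.startswith_iff _ _).mp h1
            have hs' : s' = ['q','u','o','t',';'] ++ rest := by simpa using hr.symm
            subst hs'
            have hrest : rest.length ≤ n := by simp at hlen; omega
            simp [entityParser_v3aux, pvTryA, pvPatternA, pvBaux, pvSplitAmp,
              pvSub, pvSubsB, PySem.Chars.startswith_iff, List.cons_prefix_cons,
              ih _ hrest]
          · obtain ⟨rest, hr⟩ := (PySem.Chars.startswith_iff _ _).mp h2
            have hs' : s' = ['a','p','o','s',';'] ++ rest := by simpa using hr.symm
            subst hs'
            have hrest : rest.length ≤ n := by simp at hlen; omega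
            simp [entityParser_v3aux, pvTryA, pvPatternA, pvBaux, pvSplitAmp,
              pvSub, pvSubsB, PySem.Chars.startswith_iff, List.cons_prefix_cons,
              ih _ hrest]
          · obtain ⟨rest, hr⟩ := (PySem.Chars.startswith_iff _ _).mp h3
            have hs' : s' = ['a','m','p',';'] ++ rest := by simpa using hr.symm
            subst hs'
            have hrest : rest.length ≤ n := by simp at hlen; omega
            simp [entityParser_v3aux, pvTryA, pvPatternA, pvBaux, pvSplitAmp,
              pvSub, pvSubsB, PySem.Chars.startswith_iff, List.cons_prefix_cons,
              ih _ hrest]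
          · obtain ⟨rest, hr⟩ := (PySem.Chars.startswith_iff _ _).mp h4
            have hs' : s' = ['g','t',';'] ++ rest := by simpa using hr.symm
            subst hs'
            have hrest : rest.length ≤ n := by simp at hlen; omega
            simp [entityParser_v3aux, pvTryA, pvPatternA, pvBaux, pvSplitAmp,
              pvSub, pvSubsB, PySem.Chars.startswith_iff, List.cons_prefix_cons,
              ih _ hrest]
          · obtain ⟨rest, hr⟩ := (PySem.Chars.startswith_iff _ _).mp h5
            have hs' : s' = ['l','t',';'] ++ rest := by simpa using hr.symm
            subst hs'
            have hrest : rest.length ≤ n := by simp at hlen; omega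
            simp [entityParser_v3aux, pvTryA, pvPatternA, pvBaux, pvSplitAmp,
              pvSub, pvSubsB, PySem.Chars.startswith_iff, List.cons_prefix_cons,
              ih _ hrest]
          · obtain ⟨rest, hr⟩ := (PySem.Chars.startswith_iff _ _).mp h6
            have hs' : s' = ['f','r','a','s','l',';'] ++ rest := by simpa using hr.symm
            subst hs'
            have hrest : rest.length ≤ n := by simp at hlen; omega
            simp [entityParser_v3aux, pvTryA, pvPatternA, pvBaux, pvSplitAmp,
              pvSub, pvSubsB, PySem.Chars.startswith_iff, List.cons_prefix_cons,
              ih _ hrest]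
        | none =>
          simp only [entityParser_v3aux, htry, ih s' hlen, pvBaux, pvSplitAmp, if_true,
            List.nil_append, List.flatMap_cons]
          rw [pvSub_none s' htry]
          simp
      · simp only [entityParser_v3aux, pvBaux, pvSplitAmp, if_neg hc, ih s' hlen]
        simp

-- ===== VERDICT (by name: the statement is the Claim_ definition above) =====
theorem entityParser_v3_spec : Claim_equal_entityParser_v3 := by
  intro text _
  unfold Spec_entityParser_v3 entityParser_v3 entityParser_v3_alt
  simp only [pvAux_eq text.toList.length text.toList le_rfl, pvBaux]
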